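-- pv_equiv track=rewrite | github.com/Rhaegal222/Unical | Primo Anno/Fondamenti di Programmazione 1/EPLPAPS/Tracce d'esame/110221/esercizio1.py | ovest
-- ===== SOURCE A (Python) =====
-- def ovest(matrice, righe, colonne):
--     for j in range(colonne-1,0,-1):
--         for i in range(righe):
--             if matrice[i][j] == 0 or matrice[i][j] == 3:
--                 if i>0 and matrice[i-1][j-1] == 1:
--                     matrice[i-1][j-1] = 3
--                 if matrice[i][j-1] == 1:
--                     matrice[i][j-1] = 3
--                 if i<righe-1 and matrice[i+1][j-1] == 1:
--                     matrice[i+1][j-1] = 3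
--     return matrice
-- ===== SOURCE B (Python) =====
-- def ovest(matrice, righe, colonne):
--     # Pure recursive rebuild: extract the columns, compute the final column list by
--     # structural recursion east-to-west (each column from the already-finished column
--     # to its east), then write the finished columns back into the matrix.
--     def finals(cols):
--         if len(cols) == 1:
--             return cols
--         rest = finals(cols[1:])
--         sick = [v == 0 or v == 3 for v in rest[0]]
--         n = len(sick)
--         head = [3 if v == 1 and (sick[r] or (r > 0 and sick[r - 1]) or (r + 1 < n and sick[r + 1]))
--                 else v
--                 for r, v in enumerate(cols[0])]
--         return [head] + rest
--
--     if colonne >= 2 and righe >= 1: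
--         cols = [[matrice[r][c] for r in range(righe)] for c in range(colonne)]
--         for c, col in enumerate(finals(cols)):
--             for r in range(righe):
--                 matrice[r][c] = col[r]
--     return matrice
-- ===== Notes on version B (the rewrite author's own statement) =====
-- stated objective: alternative
-- what changed: A's in-place scatter sweep (nested index loops east-to-west, every 0/3 cell writing 3 into its three western 1-neighbours) is replaced by a pure functional rebuild: the matrix is transposed into a column list, the final columns are computed by structural recursion from the east (each new column is a comprehension over the finished column to its east), and the finished columns are written back in one pass.
import Mathlib
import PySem

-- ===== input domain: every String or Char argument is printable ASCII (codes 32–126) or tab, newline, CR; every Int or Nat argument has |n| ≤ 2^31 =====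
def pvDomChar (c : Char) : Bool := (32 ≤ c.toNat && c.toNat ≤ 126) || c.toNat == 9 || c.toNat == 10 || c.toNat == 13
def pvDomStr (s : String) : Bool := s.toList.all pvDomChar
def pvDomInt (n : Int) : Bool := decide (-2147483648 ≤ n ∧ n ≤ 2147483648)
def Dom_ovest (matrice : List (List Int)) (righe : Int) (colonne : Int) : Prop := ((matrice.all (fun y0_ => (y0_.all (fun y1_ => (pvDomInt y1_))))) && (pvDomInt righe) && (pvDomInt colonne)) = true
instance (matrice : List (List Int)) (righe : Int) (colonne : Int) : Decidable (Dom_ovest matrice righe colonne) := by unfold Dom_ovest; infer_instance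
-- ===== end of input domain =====

-- B replaces A's in-place scatter sweep with a pure functional rebuild: transpose into a
-- column list, compute the final columns by structural recursion from the east, then write
-- them back; objective: alternative decomposition, same cost.  Both Pythons leave `matrice`
-- with the same contents in place; the theorems below are about the returned value.

-- pvGet m i j = matrice[i][j]; the default 7 is never produced on inputs admitted by
-- Pre_ovest (every in-loop access is then in range); it only totalises the ports.
def pvGet (m : List (List Int)) (i j : Int) : Int :=
  PySem.List.pyGetD (PySem.List.pyGetD m i []) j 7

-- pvSet m i j v = `matrice[i][j] = v` (row fetched, mutated, written back)
def pvSet (m : List (List Int)) (i j : Int) (v : Int) : List (List Int) :=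
  PySem.List.pySetD m i (PySem.List.pySetD (PySem.List.pyGetD m i []) j v)

-- ===== PORT A =====
-- body of A's inner loop over i (each 0/3 source cell scatters 3 west)
def pvBodyA (righe j : Int) (m : List (List Int)) (i : Int) : List (List Int) :=
  if pvGet m i j = 0 ∨ pvGet m i j = 3 then
    let m1 := if 0 < i ∧ pvGet m (i-1) (j-1) = 1 then pvSet m (i-1) (j-1) 3 else m
    let m2 := if pvGet m1 i (j-1) = 1 then pvSet m1 i (j-1) 3 else m1
    if i < righe - 1 ∧ pvGet m2 (i+1) (j-1) = 1 then pvSet m2 (i+1) (j-1) 3 else m2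
  else m

def ovest (matrice : List (List Int)) (righe : Int) (colonne : Int) : List (List Int) :=
  (PySem.List.pyRange (colonne-1) 0 (-1)).foldl (fun m j =>
    (PySem.List.pyRange 0 righe 1).foldl (pvBodyA righe j) m) matrice

-- ===== PORT B =====
-- pvMemb v = `v == 0 or v == 3`
def pvMemb (v : Int) : Bool := v == 0 || v == 3

-- sick = [v == 0 or v == 3 for v in east]
def pvSick (east : List Int) : List Bool := east.map pvMemb

-- head = [3 if v == 1 and (...) else v for r, v in enumerate(col)]; sick[i] is ported with
-- a default (in B the two lists always have equal length, so the default is never used)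
def pvNewcol (sick : List Bool) (col : List Int) : List Int :=
  col.mapIdx (fun r v =>
    if v == 1 && (sick.getD r false
        || (decide (0 < r) && sick.getD (r-1) false)
        || (decide (r + 1 < sick.length) && sick.getD (r+1) false)) then 3 else v)

-- finals(cols): structural recursion on the column list (B only calls it with ≥ 2 columns;
-- the [] equation only totalises it)
def pvFinals : List (List Int) → List (List Int)
  | [] => []
  | [c] => [c]
  | c0 :: c1 :: rest =>
      pvNewcol (pvSick ((pvFinals (c1 :: rest)).headD [])) c0 :: pvFinals (c1 :: rest)

-- cols = [[matrice[r][c] for r in range(righe)] for c in range(colonne)]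
def pvCols (matrice : List (List Int)) (righe colonne : Int) : List (List Int) :=
  (PySem.List.pyRange 0 colonne 1).map (fun c =>
    (PySem.List.pyRange 0 righe 1).map (fun r => pvGet matrice r c))

-- for r in range(righe): matrice[r][c] = col[r]
def pvWriteCol (righe c : Int) (m : List (List Int)) (col : List Int) : List (List Int) :=
  (PySem.List.pyRange 0 righe 1).foldl
    (fun m r => pvSet m r c (PySem.List.pyGetD col r 7)) m

def ovest_alt (matrice : List (List Int)) (righe : Int) (colonne : Int) : List (List Int) :=
  if 2 ≤ colonne ∧ 1 ≤ righe then
    (PySem.List.enumerate (pvFinals (pvCols matrice righe colonne)) 0).foldl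
      (fun m p => pvWriteCol righe p.1 m p.2) matrice
  else matrice

-- ===== PRECONDITION & SPEC =====
-- Exactly the inputs on which Python A returns: when the loops run (colonne >= 2 and
-- righe >= 1), A unconditionally reads matrice[i][colonne-1] for every i < righe, so it
-- raises IndexError unless matrice has at least righe rows and each of its first righe
-- rows has at least colonne cells; otherwise the loops are empty and A returns.
def Pre_ovest (matrice : List (List Int)) (righe : Int) (colonne : Int) : Prop :=
  2 ≤ colonne → 1 ≤ righe →
    (righe ≤ (matrice.length : Int) ∧
      ∀ row ∈ matrice.take righe.toNat, colonne ≤ (row.length : Int))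
instance (matrice : List (List Int)) (righe : Int) (colonne : Int) : Decidable (Pre_ovest matrice righe colonne) := by unfold Pre_ovest; infer_instance

def pvWitness_ovest : List (List Int) × Int × Int := ([[1, 2, 0], [1, 1, 3]], 2, 3)

def Spec_ovest (matrice : List (List Int)) (righe : Int) (colonne : Int) (out : List (List Int)) : Prop := out = ovest_alt matrice righe colonne
instance (matrice : List (List Int)) (righe : Int) (colonne : Int) (out : List (List Int)) : Decidable (Spec_ovest matrice righe colonne out) := by unfold Spec_ovest; infer_instance

-- ===== CLAIM (what is proved, stated in full; the proofs are below) =====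
def Claim_equal_ovest : Prop := ∀ (matrice : List (List Int)) (righe : Int) (colonne : Int), Dom_ovest matrice righe colonne → Pre_ovest matrice righe colonne → Spec_ovest matrice righe colonne (ovest matrice righe colonne)

-- ===== LEMMAS AND PROOFS =====

-- cell (r, c) of the matrix, as Python's access does it, at Option level
def pvCell (m : List (List Int)) (r c : Nat) : Option Int := (m[r]?.getD [])[c]?

def pvCell1 (j : Int) (row : List Int) : Bool := PySem.List.pyGetD row (j-1) 7 == 1

-- one pass of A's inner loop sets, in column j-1, exactly the 1-cells whose row satisfies P
def pvApply (m0 : List (List Int)) (j : Int) (P : Int → Bool) : List (List Int) :=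
  m0.mapIdx (fun r row =>
    if P (r : Int) && pvCell1 j row then PySem.List.pySetD row (j-1) 3 else row)

def pvG (m0 : List (List Int)) (j r : Int) : Int := pvGet m0 r j

def pvTrig (m0 : List (List Int)) (righe j r : Int) : Bool :=
  pvMemb (pvG m0 j r) || (decide (0 < r) && pvMemb (pvG m0 j (r-1)))
    || (decide (r < righe - 1) && pvMemb (pvG m0 j (r+1)))

def pvTrigA (m0 : List (List Int)) (righe j k r : Int) : Bool :=
  (decide (r < k) && pvMemb (pvG m0 j r))
    || (decide (0 < r) && decide (r - 1 < k) && decide (r < righe) && pvMemb (pvG m0 j (r-1)))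
    || (decide (r + 1 < k) && pvMemb (pvG m0 j (r+1)))

def pvTrigB (m0 : List (List Int)) (righe j k r : Int) : Bool :=
  decide (r < k) && pvTrig m0 righe j r

lemma pvGetD_nonneg {α : Type} (xs : List α) (i : Int) (d : α) (h : 0 ≤ i) :
    PySem.List.pyGetD xs i d = (xs[i.toNat]?).getD d := by
  simp [PySem.List.pyGetD, PySem.List.pyGet?_of_nonneg xs h]

lemma pvApply_getRow (m0 : List (List Int)) (j : Int) (P : Int → Bool) (r : Nat) :
    (pvApply m0 j P)[r]? = (m0[r]?).map (fun row =>
      if P (r : Int) && pvCell1 j row then PySem.List.pySetD row (j-1) 3 else row) := by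
  unfold pvApply; exact List.getElem?_mapIdx

lemma pvApply_get_src (m0 : List (List Int)) (j : Int) (P : Int → Bool) (i : Int)
    (hi : 0 ≤ i) (hj : 1 ≤ j) :
    pvGet (pvApply m0 j P) i j = pvGet m0 i j := by
  unfold pvGet
  rw [pvGetD_nonneg _ i _ hi, pvGetD_nonneg _ i _ hi, pvApply_getRow]
  cases h : m0[i.toNat]? with
  | none => simp
  | some row =>
    simp only [Option.map_some, Option.getD_some]
    split
    · rw [PySem.List.pySetD_of_nonneg _ _ (by omega),
        pvGetD_nonneg _ j _ (by omega), pvGetD_nonneg _ j _ (by omega),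
        List.getElem?_set_ne (by omega)]
    · rfl

lemma pvGet_eq (m0 : List (List Int)) (r c : Int) (hr : 0 ≤ r) (hc : 0 ≤ c) :
    pvGet m0 r c = ((m0[r.toNat]?).getD [])[c.toNat]?.getD 7 := by
  unfold pvGet; rw [pvGetD_nonneg _ _ _ hr, pvGetD_nonneg _ _ _ hc]

lemma pvApply_get_tgt (m0 : List (List Int)) (j : Int) (P : Int → Bool) (r : Int)
    (hr : 0 ≤ r) (hj : 1 ≤ j) :
    pvGet (pvApply m0 j P) r (j-1)
      = if P r && (pvGet m0 r (j-1) == 1) then 3 else pvGet m0 r (j-1) := by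
  rw [pvGet_eq _ _ _ hr (by omega), pvGet_eq m0 r _ hr (by omega), pvApply_getRow]
  cases h : m0[r.toNat]? with
  | none => simp
  | some row =>
    have hcast : ((r.toNat : Nat) : Int) = r := Int.toNat_of_nonneg hr
    have hcell : pvCell1 j row = (row[(j-1).toNat]?.getD 7 == 1) := by
      simp [pvCell1, pvGetD_nonneg _ _ _ (show (0:Int) ≤ j-1 by omega)]
    simp only [Option.map_some, Option.getD_some, hcast]
    by_cases hP : (P r && pvCell1 j row) = true
    · rw [if_pos hP]
      have hone : row[(j-1).toNat]?.getD 7 = 1 := by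
        have h2 := (Bool.and_eq_true _ _).mp hP |>.2
        rw [hcell] at h2; exact (beq_iff_eq).mp h2
      have hlt : (j-1).toNat < row.length := by
        by_contra hge
        rw [List.getElem?_eq_none (by omega)] at hone; simp at hone
      rw [PySem.List.pySetD_of_nonneg _ _ (by omega), List.getElem?_set_self hlt]
      have hPr : P r = true := ((Bool.and_eq_true _ _).mp hP).1
      rw [hone]; simp [hPr]
    · rw [if_neg hP]
      rw [hcell] at hP
      rw [if_neg hP]

lemma pvApply_congr (m0 : List (List Int)) (j : Int) (P Q : Int → Bool)
    (hj : 1 ≤ j)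
    (h : ∀ r : Nat, (r : Int) < m0.length → pvGet m0 r (j-1) = 1 → P (r : Int) = Q (r : Int)) :
    pvApply m0 j P = pvApply m0 j Q := by
  apply List.ext_getElem?
  intro n
  rw [pvApply_getRow, pvApply_getRow]
  cases hn : m0[n]? with
  | none => rfl
  | some row =>
    have hlen : n < m0.length := (List.getElem?_eq_some_iff.mp hn).1
    simp only [Option.map_some, Option.some.injEq]
    by_cases hc : pvCell1 j row = true
    · have h1 : pvGet m0 n (j-1) = 1 := by
        rw [pvGet_eq _ _ _ (by omega) (by omega)]
        simp only [Int.toNat_natCast, hn, Option.getD_some]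
        simpa [pvCell1, pvGetD_nonneg _ _ _ (show (0:Int) ≤ j-1 by omega)] using hc
      rw [h n (by exact_mod_cast hlen) h1]
    · simp only [Bool.not_eq_true] at hc
      simp [hc]

lemma pvApply_false (m0 : List (List Int)) (j : Int) (P : Int → Bool)
    (h : ∀ r : Nat, P (r : Int) = false) :
    pvApply m0 j P = m0 := by
  apply List.ext_getElem?
  intro n
  rw [pvApply_getRow]
  cases hn : m0[n]? with
  | none => rfl
  | some row => simp [h n]

lemma pvApply_set (m0 : List (List Int)) (j : Int) (P : Int → Bool) (t : Int)
    (ht : 0 ≤ t) (hj : 1 ≤ j) (h1 : pvGet m0 t (j-1) = 1) :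
    pvSet (pvApply m0 j P) t (j-1) 3 = pvApply m0 j (fun x => P x || x == t) := by
  rw [pvGet_eq _ _ _ ht (by omega)] at h1
  cases hrow : m0[t.toNat]? with
  | none => rw [hrow] at h1; simp at h1
  | some row0 =>
    rw [hrow] at h1
    simp only [Option.getD_some] at h1
    have hlen : t.toNat < m0.length := (List.getElem?_eq_some_iff.mp hrow).1
    have hcell : pvCell1 j row0 = true := by
      unfold pvCell1
      rw [pvGetD_nonneg _ _ _ (show (0:Int) ≤ j-1 by omega), h1]
      rfl
    have hltr : (j-1).toNat < row0.length := by
      by_contra hge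
      rw [List.getElem?_eq_none (by omega)] at h1; simp at h1
    unfold pvSet
    rw [PySem.List.pySetD_of_nonneg _ _ ht, pvGetD_nonneg _ _ _ ht, pvApply_getRow, hrow]
    simp only [Option.map_some, Option.getD_some, Int.toNat_of_nonneg ht]
    rw [PySem.List.pySetD_of_nonneg _ _ (by omega)]
    have hcur : (if P t && pvCell1 j row0 then PySem.List.pySetD row0 (j-1) 3 else row0).set
        (j-1).toNat 3 = row0.set (j-1).toNat 3 := by
      split
      · rw [PySem.List.pySetD_of_nonneg _ _ (by omega), List.set_set]
      · rfl
    rw [hcur]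
    apply List.ext_getElem?
    intro n
    rw [pvApply_getRow]
    by_cases hn : n = t.toNat
    · subst hn
      rw [List.getElem?_set_self (by simpa [pvApply] using hlen), hrow]
      simp only [Option.map_some, Option.some.injEq, Int.toNat_of_nonneg ht]
      simp [hcell, PySem.List.pySetD_of_nonneg _ _ (show (0:Int) ≤ j-1 by omega)]
    · rw [List.getElem?_set_ne (by omega), pvApply_getRow]
      cases hm : m0[n]? with
      | none => rfl
      | some row =>
        simp only [Option.map_some, Option.some.injEq]
        have hne : (((n : Nat) : Int) == t) = false := beq_eq_false_iff_ne.mpr (by omega)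
        simp [hne]

lemma pvApply_step (m0 : List (List Int)) (j : Int) (P : Int → Bool) (t : Int) (c : Prop)
    [Decidable c] (ht : c → 0 ≤ t) (hj : 1 ≤ j) :
    (if c ∧ pvGet (pvApply m0 j P) t (j-1) = 1
      then pvSet (pvApply m0 j P) t (j-1) 3 else pvApply m0 j P)
      = pvApply m0 j (fun x => P x || (decide c && x == t)) := by
  by_cases hc : c
  · have ht' : 0 ≤ t := ht hc
    by_cases h1 : pvGet (pvApply m0 j P) t (j-1) = 1
    · rw [if_pos ⟨hc, h1⟩]
      rw [pvApply_get_tgt _ _ _ _ ht' hj] at h1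
      have hg : pvGet m0 t (j-1) = 1 := by
        by_cases hb : (P t && (pvGet m0 t (j-1) == 1)) = true
        · rw [if_pos hb] at h1; exact absurd h1 (by norm_num)
        · rwa [if_neg hb] at h1
      rw [pvApply_set m0 j P t ht' hj hg]
      apply pvApply_congr m0 j _ _ hj
      intro r _ _
      simp [hc]
    · rw [if_neg (fun h => h1 h.2)]
      apply pvApply_congr m0 j _ _ hj
      intro r hlen h1r
      by_cases he : ((r : Nat) : Int) = t
      · have hPt : P ((r : Nat) : Int) = true := by
          rw [← he] at h1
          rw [pvApply_get_tgt _ _ _ _ (by positivity) hj, h1r] at h1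
          simpa using h1
        simp [hPt]
      · have hne : (((r : Nat) : Int) == t) = false := beq_eq_false_iff_ne.mpr he
        simp [hne]
  · rw [if_neg (fun h => hc h.1)]
    apply pvApply_congr m0 j _ _ hj
    intro r _ _
    simp [hc]

lemma pvApply_step' (m0 : List (List Int)) (j : Int) (P : Int → Bool) (t : Int)
    (ht : 0 ≤ t) (hj : 1 ≤ j) :
    (if pvGet (pvApply m0 j P) t (j-1) = 1
      then pvSet (pvApply m0 j P) t (j-1) 3 else pvApply m0 j P)
      = pvApply m0 j (fun x => P x || x == t) := by
  have h := pvApply_step m0 j P t True (fun _ => ht) hj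
  simpa using h

lemma pvTrigA_zero (m0 : List (List Int)) (righe j r : Int) (hr : 0 ≤ r) :
    pvTrigA m0 righe j 0 r = false := by
  unfold pvTrigA
  rw [decide_eq_false (by omega : ¬ r < 0), decide_eq_false (by omega : ¬ r + 1 < 0)]
  by_cases h : 0 < r
  · rw [decide_eq_false (by omega : ¬ r - 1 < 0)]; simp
  · rw [decide_eq_false h]; simp

lemma pvTrigA_succ_untrig (m0 : List (List Int)) (righe j k r : Int) (hr : 0 ≤ r)
    (hk : 0 ≤ k) (hm : pvMemb (pvG m0 j k) = false) :
    pvTrigA m0 righe j (k+1) r = pvTrigA m0 righe j k r := by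
  unfold pvTrigA
  have d1 : (decide (r < k+1) && pvMemb (pvG m0 j r))
      = (decide (r < k) && pvMemb (pvG m0 j r)) := by
    rcases eq_or_ne r k with rfl | h
    · simp [hm]
    · rw [decide_eq_decide.mpr (by omega : (r < k+1) ↔ (r < k))]
  have d2 : (decide (0 < r) && decide (r - 1 < k+1) && decide (r < righe) && pvMemb (pvG m0 j (r-1)))
      = (decide (0 < r) && decide (r - 1 < k) && decide (r < righe) && pvMemb (pvG m0 j (r-1))) := by
    rcases eq_or_ne r (k+1) with rfl | h
    · have e : (k+1-1 : Int) = k := by ring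
      simp [e, hm]
    · rw [decide_eq_decide.mpr (by omega : (r - 1 < k+1) ↔ (r - 1 < k))]
  have d3 : (decide (r + 1 < k+1) && pvMemb (pvG m0 j (r+1)))
      = (decide (r + 1 < k) && pvMemb (pvG m0 j (r+1))) := by
    rcases eq_or_ne r (k-1) with rfl | h
    · have e : (k-1+1 : Int) = k := by ring
      simp [e, hm]
    · rw [decide_eq_decide.mpr (by omega : (r + 1 < k+1) ↔ (r + 1 < k))]
  rw [d1, d2, d3]

lemma pvTrigA_succ_trig (m0 : List (List Int)) (righe j k r : Int) (hr : 0 ≤ r)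
    (hk : 0 ≤ k) (hm : pvMemb (pvG m0 j k) = true) :
    pvTrigA m0 righe j (k+1) r
      = (((pvTrigA m0 righe j k r || (decide (0 < k) && r == k-1)) || r == k)
          || (decide (k < righe - 1) && r == k+1)) := by
  unfold pvTrigA
  rcases eq_or_ne r k with rfl | h1
  · rw [decide_eq_true (by omega : r < r + 1)]
    simp [hm]
  rcases eq_or_ne r (k-1) with rfl | h2
  · have e : (k-1+1 : Int) = k := by ring
    rw [e]
    simp [hm, decide_eq_true (by omega : (0:Int) < k)]
  rcases eq_or_ne r (k+1) with rfl | h3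
  · have e : (k+1-1 : Int) = k := by ring
    rw [e]
    rw [decide_eq_true (by omega : (0:Int) < k+1), decide_eq_true (by omega : k < k+1),
      decide_eq_false (by omega : ¬ k+1 < k+1), decide_eq_false (by omega : ¬ k+1+1 < k+1),
      decide_eq_false (by omega : ¬ k+1 < k), decide_eq_false (by omega : ¬ k+1+1 < k),
      decide_eq_decide.mpr (by omega : (k+1 < righe) ↔ (k < righe - 1))]
    simp [hm, beq_eq_false_iff_ne.mpr h1, beq_eq_false_iff_ne.mpr h2]
    all_goals first | omega | infer_instance
  · rw [decide_eq_decide.mpr (by omega : (r < k+1) ↔ (r < k)),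
      decide_eq_decide.mpr (by omega : (r - 1 < k+1) ↔ (r - 1 < k)),
      decide_eq_decide.mpr (by omega : (r + 1 < k+1) ↔ (r + 1 < k))]
    simp [beq_eq_false_iff_ne.mpr h1, beq_eq_false_iff_ne.mpr h2, beq_eq_false_iff_ne.mpr h3]
    all_goals first | omega | infer_instance

lemma pvTrigA_full (m0 : List (List Int)) (righe j r : Int) (_hr : 0 ≤ r) :
    pvTrigA m0 righe j righe r = pvTrigB m0 righe j righe r := by
  unfold pvTrigA pvTrigB pvTrig
  by_cases h : r < righe
  · have dd : decide (r + 1 < righe) = decide (r < righe - 1) :=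
      decide_eq_decide.mpr (by omega)
    rw [decide_eq_true h, decide_eq_true (by omega : r - 1 < righe), dd]
    simp [Bool.or_assoc]
  · rw [decide_eq_false h, decide_eq_false (by omega : ¬ r + 1 < righe)]
    simp

lemma pvMemb_iff (v : Int) : pvMemb v = true ↔ (v = 0 ∨ v = 3) := by
  simp [pvMemb]

lemma pvBodyA_step (m0 : List (List Int)) (righe j : Int) (k : Nat) (hj : 1 ≤ j) :
    pvBodyA righe j (pvApply m0 j (pvTrigA m0 righe j (k : Int))) (k : Int)
      = pvApply m0 j (pvTrigA m0 righe j ((k : Int) + 1)) := by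
  set K : Int := (k : Int) with hK
  have hK0 : 0 ≤ K := Int.natCast_nonneg k
  set P : Int → Bool := pvTrigA m0 righe j K with hP
  unfold pvBodyA
  rw [pvApply_get_src m0 j P K hK0 hj]
  by_cases hm : pvMemb (pvG m0 j K) = true
  · have hm' : pvGet m0 K j = 0 ∨ pvGet m0 K j = 3 := (pvMemb_iff _).mp hm
    rw [if_pos hm']
    dsimp only
    rw [pvApply_step m0 j P (K-1) (0 < K) (fun h => by omega) hj]
    rw [pvApply_step' m0 j _ K hK0 hj]
    rw [pvApply_step m0 j _ (K+1) (K < righe - 1) (fun _ => by omega) hj]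
    apply pvApply_congr m0 j _ _ hj
    intro r _ _
    exact (pvTrigA_succ_trig m0 righe j K r (Int.natCast_nonneg r) hK0 hm).symm
  · have hm' : ¬ (pvGet m0 K j = 0 ∨ pvGet m0 K j = 3) := fun h => hm ((pvMemb_iff _).mpr h)
    rw [if_neg hm']
    apply pvApply_congr m0 j _ _ hj
    intro r _ _
    exact (pvTrigA_succ_untrig m0 righe j K r (Int.natCast_nonneg r) hK0
      ((Bool.not_eq_true _).mp hm)).symm

lemma pvFoldA (m0 : List (List Int)) (righe j : Int) (k : Nat) (hj : 1 ≤ j) :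
    (PySem.List.pyRange 0 (k : Int) 1).foldl (pvBodyA righe j) m0
      = pvApply m0 j (pvTrigA m0 righe j (k : Int)) := by
  induction k with
  | zero =>
    rw [Nat.cast_zero, PySem.List.pyRange_one_eq_nil le_rfl]
    exact (pvApply_false m0 j _ (fun r => pvTrigA_zero m0 righe j r (Int.natCast_nonneg r))).symm
  | succ k ih =>
    rw [Nat.cast_succ, PySem.List.pyRange_one_succ_right (Int.natCast_nonneg k),
      List.foldl_append, List.foldl_cons, List.foldl_nil, ih]
    exact pvBodyA_step m0 righe j k hj

-- ---------- cell-level lemmas ----------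

lemma pvCell_get (m : List (List Int)) (r c : Nat) :
    pvGet m (r : Int) (c : Int) = (pvCell m r c).getD 7 := by
  rw [pvGet_eq m _ _ (Int.natCast_nonneg r) (Int.natCast_nonneg c)]
  simp [pvCell]

lemma pvCell_pvApply (m : List (List Int)) (j : Int) (P : Int → Bool) (hj : 1 ≤ j)
    (r c : Nat) :
    pvCell (pvApply m j P) r c
      = if c = (j-1).toNat ∧ P (r : Int) = true ∧ pvCell m r c = some 1
        then some 3 else pvCell m r c := by
  unfold pvCell
  rw [pvApply_getRow]
  cases hn : m[r]? with
  | none => simp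
  | some row =>
    simp only [Option.map_some, Option.getD_some]
    by_cases hP : (P (r : Int) && pvCell1 j row) = true
    · rw [if_pos hP]
      have hPr := ((Bool.and_eq_true _ _).mp hP).1
      have hc1 : row[(j-1).toNat]? = some 1 := by
        have h2 := ((Bool.and_eq_true _ _).mp hP).2
        have h3 : PySem.List.pyGetD row (j-1) 7 = 1 := by simpa [pvCell1] using h2
        rw [pvGetD_nonneg _ _ _ (by omega : (0:Int) ≤ j-1)] at h3
        cases hg : row[(j-1).toNat]? with
        | none => rw [hg] at h3; simp at h3
        | some v => rw [hg] at h3; simp at h3; rw [h3]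
      have hlt : (j-1).toNat < row.length := (List.getElem?_eq_some_iff.mp hc1).1
      rw [PySem.List.pySetD_of_nonneg _ _ (by omega : (0:Int) ≤ j-1)]
      by_cases hcc : c = (j-1).toNat
      · subst hcc
        rw [List.getElem?_set_self hlt, if_pos ⟨rfl, hPr, hc1⟩]
      · rw [List.getElem?_set_ne (by omega), if_neg (by tauto)]
    · rw [if_neg hP]
      have hcond : ¬ (c = (j-1).toNat ∧ P (r : Int) = true ∧ row[c]? = some 1) := by
        rintro ⟨hcc, hPr, h1⟩
        apply hP
        rw [Bool.and_eq_true]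
        refine ⟨hPr, ?_⟩
        simp [pvCell1, pvGetD_nonneg _ _ _ (show (0:Int) ≤ j-1 by omega), ← hcc, h1]
      rw [if_neg hcond]

lemma pvCell_pvSet (m : List (List Int)) (i c : Int) (v : Int) (hi : 0 ≤ i) (hc : 0 ≤ c)
    (r' c' : Nat) :
    pvCell (pvSet m i c v) r' c'
      = if r' = i.toNat ∧ c' = c.toNat ∧ (pvCell m r' c').isSome
        then some v else pvCell m r' c' := by
  unfold pvCell pvSet
  rw [PySem.List.pySetD_of_nonneg _ _ hi, PySem.List.pySetD_of_nonneg _ _ hc,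
    pvGetD_nonneg _ _ _ hi]
  by_cases hr' : r' = i.toNat
  · subst hr'
    by_cases hil : i.toNat < m.length
    · rw [List.getElem?_set_self hil]
      simp only [Option.getD_some]
      have hrowe : m[i.toNat]? = some m[i.toNat] := List.getElem?_eq_getElem hil
      rw [hrowe]
      simp only [Option.getD_some]
      by_cases hcc : c' = c.toNat
      · subst hcc
        by_cases hcl : c.toNat < (m[i.toNat]).length
        · rw [List.getElem?_set_self hcl]
          simp [List.getElem?_eq_getElem hcl]
        · rw [List.set_eq_of_length_le (by omega),
            if_neg (by rw [List.getElem?_eq_none (by omega)]; simp)]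
      · rw [List.getElem?_set_ne (by omega), if_neg (by tauto)]
    · rw [List.set_eq_of_length_le (by omega)]
      have hnone : m[i.toNat]? = none := List.getElem?_eq_none (by omega)
      rw [hnone]
      simp
  · rw [List.getElem?_set_ne (by omega), if_neg (by tauto)]

lemma length_pvApply (m : List (List Int)) (j : Int) (P : Int → Bool) :
    (pvApply m j P).length = m.length := by
  simp [pvApply]

lemma length_pvSet (m : List (List Int)) (i c : Int) (v : Int) :
    (pvSet m i c v).length = m.length := by
  simp [pvSet, PySem.List.length_pySetD]

-- ---------- pvFinals structure ----------

lemma length_pvNewcol (s : List Bool) (col : List Int) :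
    (pvNewcol s col).length = col.length := by
  simp [pvNewcol]

lemma pvFinals_cons₂ (c0 c1 : List Int) (rest : List (List Int)) :
    pvFinals (c0 :: c1 :: rest)
      = pvNewcol (pvSick ((pvFinals (c1 :: rest)).headD [])) c0 :: pvFinals (c1 :: rest) := rfl

lemma drop_one_pvFinals (L : List (List Int)) :
    (pvFinals L).drop 1 = pvFinals (L.drop 1) := by
  match L with
  | [] => rfl
  | [c] => rfl
  | c0 :: c1 :: rest => rw [pvFinals_cons₂]; rfl

lemma drop_pvFinals (i : Nat) (L : List (List Int)) :
    (pvFinals L).drop i = pvFinals (L.drop i) := by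
  induction i generalizing L with
  | zero => rfl
  | succ i ih =>
    have h1 : (pvFinals L).drop (i+1) = ((pvFinals L).drop 1).drop i := by
      rw [List.drop_drop, Nat.add_comm]
    rw [h1, drop_one_pvFinals, ih, List.drop_drop, Nat.add_comm]

theorem length_pvFinals : ∀ (L : List (List Int)), (pvFinals L).length = L.length
  | [] => rfl
  | [_] => rfl
  | c0 :: c1 :: rest => by
      rw [pvFinals_cons₂]
      simp [length_pvFinals (c1 :: rest)]

-- value of row r of the final column c (7 is a junk default, never reached in range)
def pvFinV (cols : List (List Int)) (c r : Nat) : Int :=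
  (((pvFinals (cols.drop c)).headD [])[r]?).getD 7

lemma pvGetD_lt {α : Type} (l : List α) (c : Nat) (d : α) (h : c < l.length) :
    l.getD c d = l[c] := by
  simp [List.getD_eq_getElem?_getD, List.getElem?_eq_getElem h]

lemma pvFinals_head_rec (cols : List (List Int)) (c : Nat) (h : c + 1 < cols.length) :
    (pvFinals (cols.drop c)).headD []
      = pvNewcol (pvSick ((pvFinals (cols.drop (c+1))).headD [])) (cols.getD c []) := by
  have h1 : cols.drop c = cols[c] :: cols.drop (c+1) :=
    List.drop_eq_getElem_cons (by omega)
  cases hd : cols.drop (c+1) with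
  | nil =>
    exfalso
    have := congrArg List.length hd
    simp at this
    omega
  | cons d0 ds =>
    rw [h1, hd, pvFinals_cons₂, List.headD_cons, pvGetD_lt cols c [] (by omega)]

lemma pvFinals_head_last (cols : List (List Int)) (c : Nat) (h : c + 1 = cols.length) :
    (pvFinals (cols.drop c)).headD [] = cols.getD c [] := by
  have h1 : cols.drop c = cols[c] :: cols.drop (c+1) :=
    List.drop_eq_getElem_cons (by omega)
  have h2 : cols.drop (c+1) = [] := List.drop_eq_nil_of_le (by omega)
  rw [h1, h2]
  rw [pvGetD_lt cols c [] (by omega)]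
  rfl

lemma pvFinals_head_len (L : List (List Int)) (c : Nat) (h : c < L.length) :
    ((pvFinals (L.drop c)).headD []).length = (L.getD c []).length := by
  by_cases hlast : c + 1 = L.length
  · rw [pvFinals_head_last L c hlast]
  · rw [pvFinals_head_rec L c (by omega), length_pvNewcol]

-- ---------- the column list ----------

lemma pvRange_natCast (n : Nat) :
    PySem.List.pyRange 0 (n : Int) 1 = (List.range n).map (fun (k : Nat) => (k : Int)) := by
  rw [PySem.List.pyRange_one]
  have h : (((n : Int) - 0)).toNat = n := by omega
  rw [h]
  exact List.map_congr_left (fun a _ => by ring)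

lemma pvCols_length (m : List (List Int)) (R' C' : Nat) :
    (pvCols m (R' : Int) (C' : Int)).length = C' := by
  simp [pvCols, pvRange_natCast]

lemma pvCols_getD (m : List (List Int)) (R' C' c : Nat) (hc : c < C') :
    (pvCols m (R' : Int) (C' : Int)).getD c []
      = (PySem.List.pyRange 0 (R' : Int) 1).map (fun r => pvGet m r (c : Int)) := by
  unfold pvCols
  rw [pvRange_natCast C', List.getD_eq_getElem?_getD, List.getElem?_map, List.getElem?_map,
    List.getElem?_range hc]
  simp

lemma pvCols_col_len (m : List (List Int)) (R' C' c : Nat) (hc : c < C') :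
    ((pvCols m (R' : Int) (C' : Int)).getD c []).length = R' := by
  rw [pvCols_getD m R' C' c hc]
  simp [pvRange_natCast]

lemma pvCols_entry (m : List (List Int)) (R' C' c r : Nat) (hc : c < C') (hr : r < R') :
    ((pvCols m (R' : Int) (C' : Int)).getD c [])[r]? = some (pvGet m (r : Int) (c : Int)) := by
  rw [pvCols_getD m R' C' c hc, pvRange_natCast R', List.getElem?_map, List.getElem?_map,
    List.getElem?_range hr]
  rfl

-- ---------- A's sweep as iterated pvApply ----------

def pvInner (righe j : Int) (m : List (List Int)) : List (List Int) :=
  (PySem.List.pyRange 0 righe 1).foldl (pvBodyA righe j) m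

def pvAfold (m0 : List (List Int)) (righe colonne : Int) (k : Nat) : List (List Int) :=
  (List.range k).foldl (fun m (x : Nat) => pvInner righe (colonne - 1 - (x : Int)) m) m0

lemma ovest_eq_pvAfold (m : List (List Int)) (righe colonne : Int) :
    ovest m righe colonne = pvAfold m righe colonne (colonne - 1).toNat := by
  unfold ovest pvAfold pvInner
  rw [PySem.List.pyRange_neg_one (colonne-1) 0, List.foldl_map]
  rw [show colonne - 1 - 0 = colonne - 1 from by ring]

lemma pvInner_pvApply (m : List (List Int)) (R' : Nat) (j : Int) (hj : 1 ≤ j) :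
    pvInner ((R' : Nat) : Int) j m = pvApply m j (pvTrigB m (R' : Int) j (R' : Int)) := by
  unfold pvInner
  rw [pvFoldA m (R' : Int) j R' hj]
  apply pvApply_congr m j _ _ hj
  intro r _ _
  exact pvTrigA_full m (R' : Int) j r (Int.natCast_nonneg r)

-- under the Pre_ shape, every cell of the righe × colonne window is present
lemma pvCell_orig (m0 : List (List Int)) (R' C' : Nat)
    (hlen : R' ≤ m0.length)
    (hrow : ∀ r : Nat, r < R' → C' ≤ (m0[r]?.getD []).length)
    (r c : Nat) (hr : r < R') (hc : c < C') :
    pvCell m0 r c = some (pvGet m0 (r : Int) (c : Int)) := by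
  have hrl : r < m0.length := by omega
  have hrowe : m0[r]? = some m0[r] := List.getElem?_eq_getElem hrl
  have hcl : c < (m0[r]).length := by
    have h2 := hrow r hr
    rw [hrowe] at h2
    simp at h2
    omega
  have hs : pvCell m0 r c = some (m0[r])[c] := by
    unfold pvCell
    rw [hrowe]
    simp [List.getElem?_eq_getElem hcl]
  rw [hs, pvCell_get]
  unfold pvCell
  rw [hrowe]
  simp [List.getElem?_eq_getElem hcl]

-- the value of the final column c at row r equals the B-side write-back value
lemma pvFinV_getD (cols : List (List Int)) (c r : Nat) :
    ((pvFinals cols).getD c []).getD r 7 = pvFinV cols c r := by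
  unfold pvFinV
  rw [← drop_pvFinals]
  have h1 : (pvFinals cols).getD c [] = ((pvFinals cols).drop c).headD [] := by
    rw [List.getD_eq_getElem?_getD, List.headD_eq_head?_getD, List.head?_drop]
  rw [h1, List.getD_eq_getElem?_getD]

-- the eastmost final column is the original column
lemma pvFinV_last (m0 : List (List Int)) (R' C' : Nat) (hC : 2 ≤ C') (r : Nat) (hr : r < R') :
    pvFinV (pvCols m0 (R' : Int) (C' : Int)) (C'-1) r
      = pvGet m0 (r : Int) (((C'-1 : Nat)) : Int) := by
  unfold pvFinV
  rw [pvFinals_head_last _ (C'-1) (by rw [pvCols_length]; omega),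
    pvCols_entry m0 R' C' (C'-1) r (by omega) hr]
  rfl

-- the defining recurrence of a non-last final column, at entry level
lemma pvFinV_rec (m0 : List (List Int)) (R' C' c r : Nat) (hc : c + 1 < C') (hr : r < R') :
    pvFinV (pvCols m0 (R' : Int) (C' : Int)) c r
      = (if pvGet m0 (r : Int) (c : Int) == 1
            && (((pvSick ((pvFinals ((pvCols m0 (R' : Int) (C' : Int)).drop (c+1))).headD [])).getD r false
              || (decide (0 < r) && (pvSick ((pvFinals ((pvCols m0 (R' : Int) (C' : Int)).drop (c+1))).headD [])).getD (r-1) false))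
              || (decide (r + 1 < (pvSick ((pvFinals ((pvCols m0 (R' : Int) (C' : Int)).drop (c+1))).headD [])).length)
                  && (pvSick ((pvFinals ((pvCols m0 (R' : Int) (C' : Int)).drop (c+1))).headD [])).getD (r+1) false))
         then 3 else pvGet m0 (r : Int) (c : Int)) := by
  unfold pvFinV
  rw [pvFinals_head_rec _ c (by rw [pvCols_length]; omega)]
  unfold pvNewcol
  rw [List.getElem?_mapIdx, pvCols_entry m0 R' C' c r (by omega) hr]
  simp only [Option.map_some, Option.getD_some]

lemma pvSick_getD (east : List Int) (i : Nat) (hi : i < east.length) :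
    (pvSick east).getD i false = pvMemb (east[i]?.getD 7) := by
  unfold pvSick
  rw [List.getD_eq_getElem?_getD, List.getElem?_map, List.getElem?_eq_getElem hi]
  simp

lemma pvEastLen (m0 : List (List Int)) (R' C' jn : Nat) (hjn : jn < C') :
    ((pvFinals ((pvCols m0 (R' : Int) (C' : Int)).drop jn)).headD []).length = R' := by
  rw [pvFinals_head_len _ jn (by rw [pvCols_length]; omega), pvCols_col_len m0 R' C' jn hjn]

-- ---------- the main A-side invariant ----------

lemma pvAinv (m0 : List (List Int)) (R' C' : Nat) (hC : 2 ≤ C')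
    (hlen : R' ≤ m0.length)
    (hrow : ∀ r : Nat, r < R' → C' ≤ (m0[r]?.getD []).length) :
    ∀ k : Nat, k ≤ C' - 1 → ∀ r c : Nat,
      pvCell (pvAfold m0 (R' : Int) (C' : Int) k) r c
        = if r < R' ∧ C' - 1 - k ≤ c ∧ c < C' - 1
          then some (pvFinV (pvCols m0 (R' : Int) (C' : Int)) c r)
          else pvCell m0 r c := by
  intro k
  induction k with
  | zero =>
    intro _ r c
    rw [if_neg (by omega)]
    unfold pvAfold
    rw [List.range_zero, List.foldl_nil]
  | succ k ih =>
    intro hk r c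
    have hk' : k ≤ C' - 1 := by omega
    have hstep : pvAfold m0 (R' : Int) (C' : Int) (k+1)
        = pvInner ((R' : Nat) : Int) ((C' : Int) - 1 - (k : Int))
            (pvAfold m0 (R' : Int) (C' : Int) k) := by
      unfold pvAfold
      rw [List.range_succ, List.foldl_append, List.foldl_cons, List.foldl_nil]
    set M := pvAfold m0 (R' : Int) (C' : Int) k with hM
    set cols := pvCols m0 (R' : Int) (C' : Int) with hcols
    have hj : (1 : Int) ≤ (C' : Int) - 1 - (k : Int) := by omega
    set j : Int := (C' : Int) - 1 - (k : Int) with hjdef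
    have hjm1 : (j - 1).toNat = C' - 2 - k := by omega
    have hjcast : j = ((C'-1-k : Nat) : Int) := by omega
    rw [hstep, pvInner_pvApply M R' j hj, pvCell_pvApply M j _ hj r c]
    -- column C'-1-k of M is already final
    have hcolj : ∀ i : Nat, i < R' →
        pvGet M (i : Int) (((C'-1-k : Nat)) : Int) = pvFinV cols (C'-1-k) i := by
      intro i hi
      rw [pvCell_get M i (C'-1-k), ih hk' i (C'-1-k)]
      by_cases hk0 : k = 0
      · subst hk0
        rw [if_neg (by omega)]
        simp only [Nat.sub_zero]
        rw [pvCell_orig m0 R' C' hlen hrow i (C'-1) hi (by omega)]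
        simp only [Option.getD_some]
        rw [hcols]
        exact (pvFinV_last m0 R' C' hC i hi).symm
      · rw [if_pos ⟨hi, by omega, by omega⟩]
        simp
    by_cases hcc : c = C' - 2 - k
    · subst hcc
      have hout : pvCell M r (C'-2-k) = pvCell m0 r (C'-2-k) := by
        rw [ih hk', if_neg (by omega)]
      by_cases hrR : r < R'
      · have horig := pvCell_orig m0 R' C' hlen hrow r (C'-2-k) hrR (by omega)
        set a : Int := pvGet m0 (r : Int) ((C'-2-k : Nat) : Int) with ha
        set east : List Int := (pvFinals (cols.drop (C'-1-k))).headD [] with heast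
        have heastlen : east.length = R' := by
          rw [heast, hcols]
          exact pvEastLen m0 R' C' (C'-1-k) (by omega)
        have hslen : (pvSick east).length = R' := by
          unfold pvSick
          rw [List.length_map, heastlen]
        have hsick : ∀ i : Nat, i < R' →
            (pvSick east).getD i false = pvMemb (pvFinV cols (C'-1-k) i) := by
          intro i hi2
          rw [pvSick_getD east i (by omega)]
          show pvMemb (east[i]?.getD 7) = pvMemb (pvFinV cols (C'-1-k) i)
          unfold pvFinV
          rw [← heast]
        have hP : pvTrigB M ((R' : Nat) : Int) j ((R' : Nat) : Int) (r : Int)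
            = (((pvSick east).getD r false
               || (decide (0 < r) && (pvSick east).getD (r-1) false))
               || (decide (r + 1 < (pvSick east).length) && (pvSick east).getD (r+1) false)) := by
          unfold pvTrigB pvTrig pvG
          rw [decide_eq_true (show (r : Int) < ((R' : Nat) : Int) by exact_mod_cast hrR),
            Bool.true_and]
          have e1 : pvMemb (pvGet M (r : Int) j) = (pvSick east).getD r false := by
            rw [hjcast, hcolj r hrR, hsick r hrR]
          have e2 : (decide ((0 : Int) < (r : Int)) && pvMemb (pvGet M ((r : Int)-1) j))
              = (decide (0 < r) && (pvSick east).getD (r-1) false) := by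
            by_cases h0 : 0 < r
            · rw [decide_eq_true (show (0 : Int) < (r : Int) by exact_mod_cast h0),
                decide_eq_true h0]
              have ecast : (r : Int) - 1 = ((r-1 : Nat) : Int) := by omega
              rw [ecast, hjcast, hcolj (r-1) (by omega), hsick (r-1) (by omega)]
            · rw [decide_eq_false (show ¬ (0 : Int) < (r : Int) by exact_mod_cast h0),
                decide_eq_false h0]
              simp
          have e3 : (decide ((r : Int) < ((R' : Nat) : Int) - 1) && pvMemb (pvGet M ((r : Int)+1) j))
              = (decide (r + 1 < (pvSick east).length) && (pvSick east).getD (r+1) false) := by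
            rw [hslen]
            by_cases h1 : r + 1 < R'
            · rw [decide_eq_true (show (r : Int) < ((R' : Nat) : Int) - 1 by omega),
                decide_eq_true h1]
              have ecast : (r : Int) + 1 = ((r+1 : Nat) : Int) := by push_cast; ring
              rw [ecast, hjcast, hcolj (r+1) h1, hsick (r+1) h1]
            · rw [decide_eq_false (show ¬ (r : Int) < ((R' : Nat) : Int) - 1 by omega),
                decide_eq_false h1]
              simp
          rw [e1, e2, e3]
        have hrec : pvFinV cols (C'-2-k) r
            = (if a == 1 && (((pvSick east).getD r false
                || (decide (0 < r) && (pvSick east).getD (r-1) false))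
                || (decide (r + 1 < (pvSick east).length) && (pvSick east).getD (r+1) false))
               then 3 else a) := by
          have hx := pvFinV_rec m0 R' C' (C'-2-k) r (by omega) hrR
          have e : C'-2-k+1 = C'-1-k := by omega
          rw [e] at hx
          rw [hcols, heast, hcols, ha]
          exact hx
        rw [hout, horig]
        have hone : ((C'-2-k) = (j-1).toNat) := hjm1.symm
        by_cases htr : (pvTrigB M ((R' : Nat) : Int) j ((R' : Nat) : Int) (r : Int)) = true ∧ a = 1
        · have hbool : (a == 1 && (((pvSick east).getD r false
              || (decide (0 < r) && (pvSick east).getD (r-1) false))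
              || (decide (r + 1 < (pvSick east).length) && (pvSick east).getD (r+1) false))) = true := by
            rw [← hP]
            simp [htr.2, htr.1]
          rw [if_pos ⟨hone, htr.1, by rw [htr.2]⟩, if_pos ⟨hrR, by omega, by omega⟩, hrec,
            if_pos hbool]
        · have hcondf : ¬ ((C'-2-k) = (j-1).toNat
              ∧ pvTrigB M ((R' : Nat) : Int) j ((R' : Nat) : Int) (r : Int) = true
              ∧ some a = some 1) := by
            rintro ⟨_, hta, haa⟩
            exact htr ⟨hta, Option.some.inj haa⟩
          have hbool : (a == 1 && (((pvSick east).getD r false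
              || (decide (0 < r) && (pvSick east).getD (r-1) false))
              || (decide (r + 1 < (pvSick east).length) && (pvSick east).getD (r+1) false))) = false := by
            rw [← hP]
            by_cases ht : pvTrigB M ((R' : Nat) : Int) j ((R' : Nat) : Int) (r : Int) = true
            · have ha1 : ¬ a = 1 := fun h => htr ⟨ht, h⟩
              simp [ha1]
            · have hf : pvTrigB M ((R' : Nat) : Int) j ((R' : Nat) : Int) (r : Int) = false := by
                revert ht
                cases pvTrigB M ((R' : Nat) : Int) j ((R' : Nat) : Int) (r : Int) <;> simp
              simp [hf]
          rw [if_neg hcondf, if_pos ⟨hrR, by omega, by omega⟩, hrec, if_neg (by rw [hbool]; exact Bool.false_ne_true)]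
      · have hPf : pvTrigB M ((R' : Nat) : Int) j ((R' : Nat) : Int) (r : Int) = false := by
          unfold pvTrigB
          rw [decide_eq_false (show ¬ (r : Int) < ((R' : Nat) : Int) by exact_mod_cast hrR)]
          simp
        rw [if_neg (by rintro ⟨_, ht, _⟩; rw [hPf] at ht; exact Bool.false_ne_true ht)]
        rw [ih hk', if_neg (by omega), if_neg (by omega)]
    · rw [if_neg (by rintro ⟨h1, _, _⟩; exact hcc (by omega))]
      rw [ih hk']
      have hiff : (r < R' ∧ C'-1-k ≤ c ∧ c < C'-1) ↔ (r < R' ∧ C'-1-(k+1) ≤ c ∧ c < C'-1) := by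
        omega
      rw [if_congr hiff rfl rfl]

-- ---------- the B-side write-back ----------

lemma pvWriteColAux (cI : Int) (col : List Int) (hc : 0 ≤ cI) :
    ∀ (s : Nat) (m : List (List Int)) (r' c' : Nat),
      pvCell ((PySem.List.pyRange 0 (s : Int) 1).foldl
          (fun m r => pvSet m r cI (PySem.List.pyGetD col r 7)) m) r' c'
        = if r' < s ∧ c' = cI.toNat ∧ (pvCell m r' c').isSome
          then some (col.getD r' 7) else pvCell m r' c' := by
  intro s
  induction s with
  | zero =>
    intro m r' c'
    rw [Nat.cast_zero, PySem.List.pyRange_one_eq_nil le_rfl, List.foldl_nil,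
      if_neg (by omega)]
  | succ s ih =>
    intro m r' c'
    rw [Nat.cast_succ, PySem.List.pyRange_one_succ_right (Int.natCast_nonneg s),
      List.foldl_append, List.foldl_cons, List.foldl_nil,
      pvCell_pvSet _ _ _ _ (Int.natCast_nonneg s) hc r' c', ih m r' c']
    have hgd : PySem.List.pyGetD col ((s : Nat) : Int) 7 = col.getD s 7 := by
      simp
    have hE : (if r' < s ∧ c' = cI.toNat ∧ (pvCell m r' c').isSome = true
          then some (col.getD r' 7) else pvCell m r' c').isSome
        = (pvCell m r' c').isSome := by
      split_ifs with h
      · simp [h.2.2]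
      · rfl
    rw [hgd, hE, Int.toNat_natCast]
    by_cases hb : (pvCell m r' c').isSome
    · by_cases hcc : c' = cI.toNat
      · rcases Nat.lt_trichotomy r' s with h | h | h
        · rw [if_neg (by omega), if_pos ⟨h, hcc, hb⟩, if_pos ⟨by omega, hcc, hb⟩]
        · subst h
          rw [if_pos ⟨rfl, hcc, hb⟩, if_pos ⟨by omega, hcc, hb⟩]
        · rw [if_neg (by omega), if_neg (by omega), if_neg (by omega)]
      · rw [if_neg (by tauto), if_neg (by tauto), if_neg (by tauto)]
    · rw [if_neg (by tauto), if_neg (by tauto), if_neg (by tauto)]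

lemma pvWriteCol_cell (R' : Nat) (cI : Int) (hc : 0 ≤ cI) (m : List (List Int))
    (col : List Int) (r' c' : Nat) :
    pvCell (pvWriteCol ((R' : Nat) : Int) cI m col) r' c'
      = if r' < R' ∧ c' = cI.toNat ∧ (pvCell m r' c').isSome
        then some (col.getD r' 7) else pvCell m r' c' :=
  pvWriteColAux cI col hc R' m r' c'

lemma pvWriteFold (R' : Nat) :
    ∀ (L : List (List Int)) (n : Nat) (m : List (List Int)) (r' c' : Nat),
      pvCell ((PySem.List.enumerate L ((n : Nat) : Int)).foldl
          (fun m p => pvWriteCol (R' : Int) p.1 m p.2) m) r' c'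
        = if r' < R' ∧ n ≤ c' ∧ c' < n + L.length ∧ (pvCell m r' c').isSome
          then some ((L.getD (c'-n) []).getD r' 7) else pvCell m r' c' := by
  intro L
  induction L with
  | nil =>
    intro n m r' c'
    rw [PySem.List.enumerate_nil, List.foldl_nil,
      if_neg (by rintro ⟨_, h1, h2, _⟩; simp at h2; omega)]
  | cons c0 rest ih =>
    intro n m r' c'
    rw [PySem.List.enumerate_cons, List.foldl_cons]
    have hcast : ((n : Nat) : Int) + 1 = (((n+1 : Nat)) : Int) := by push_cast; ring
    rw [hcast, ih (n+1) _ r' c']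
    rw [pvWriteCol_cell R' ((n : Nat) : Int) (Int.natCast_nonneg n) m c0 r' c']
    have hE : (if r' < R' ∧ c' = ((n : Nat) : Int).toNat ∧ (pvCell m r' c').isSome
          then some (c0.getD r' 7) else pvCell m r' c').isSome
        = (pvCell m r' c').isSome := by
      split_ifs with h
      · simp [h.2.2]
      · rfl
    rw [hE, Int.toNat_natCast]
    by_cases hb : (pvCell m r' c').isSome
    · by_cases hrR : r' < R'
      · rcases Nat.lt_trichotomy c' n with h | h | h
        · rw [if_neg (by omega), if_neg (by omega), if_neg (by omega)]
        · subst h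
          have h3 : c' < c' + (c0 :: rest).length := by simp
          rw [if_neg (by omega), if_pos ⟨hrR, rfl, hb⟩, if_pos ⟨hrR, le_refl _, h3, hb⟩]
          simp
        · by_cases hin : c' < n + (c0 :: rest).length
          · have hin' : c' < (n+1) + rest.length := by simp at hin; omega
            rw [if_pos ⟨hrR, by omega, hin', hb⟩, if_pos ⟨hrR, by omega, hin, hb⟩]
            have hsub : c' - n = (c' - (n+1)) + 1 := by omega
            rw [hsub, List.getD_cons_succ]
          · have hnin : ¬ c' < (n+1) + rest.length := by simp at hin ⊢; omega
            rw [if_neg (by tauto), if_neg (by omega), if_neg (by tauto)]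
      · rw [if_neg (by tauto), if_neg (by tauto), if_neg (by tauto)]
    · rw [if_neg (by tauto), if_neg (by tauto), if_neg (by tauto)]

-- ---------- lengths ----------

lemma length_pvInner (m : List (List Int)) (R' : Nat) (j : Int) (hj : 1 ≤ j) :
    (pvInner ((R' : Nat) : Int) j m).length = m.length := by
  rw [pvInner_pvApply m R' j hj, length_pvApply]

lemma length_pvAfold (m0 : List (List Int)) (R' C' : Nat) :
    ∀ k : Nat, k ≤ C' - 1 → (pvAfold m0 (R' : Int) (C' : Int) k).length = m0.length := by
  intro k
  induction k with
  | zero => intro _; rfl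
  | succ k ih =>
    intro hk
    unfold pvAfold
    rw [List.range_succ, List.foldl_append, List.foldl_cons, List.foldl_nil]
    have hj : (1 : Int) ≤ (C' : Int) - 1 - (k : Int) := by omega
    rw [length_pvInner _ R' _ hj]
    exact ih (by omega)

lemma length_pvWriteCol (R' : Nat) (cI : Int) (m : List (List Int)) (col : List Int) :
    (pvWriteCol ((R' : Nat) : Int) cI m col).length = m.length := by
  unfold pvWriteCol
  rw [pvRange_natCast R']
  induction R' generalizing m with
  | zero => rfl
  | succ n ih =>
    rw [List.range_succ, List.map_append, List.foldl_append]
    simp only [List.map_cons, List.map_nil, List.foldl_cons, List.foldl_nil]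
    rw [length_pvSet]
    exact ih m

lemma length_pvWriteAll (R' : Nat) :
    ∀ (L : List (List Int)) (n : Int) (m : List (List Int)),
      ((PySem.List.enumerate L n).foldl (fun m p => pvWriteCol (R' : Int) p.1 m p.2) m).length
        = m.length := by
  intro L
  induction L with
  | nil => intro n m; rfl
  | cons c0 rest ih =>
    intro n m
    rw [PySem.List.enumerate_cons, List.foldl_cons, ih, length_pvWriteCol]

-- fold that never changes the accumulator
lemma pvFoldl_id (l : List Int) (m : List (List Int)) :
    l.foldl (fun m (_ : Int) => m) m = m := by
  induction l <;> simp_all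

-- the two per-cell descriptions coincide
lemma pvFinal_eq (m : List (List Int)) (righe colonne : Int)
    (hC : 2 ≤ colonne) (hR : 1 ≤ righe)
    (hlenI : righe ≤ (m.length : Int))
    (hrowI : ∀ row ∈ m.take righe.toNat, colonne ≤ (row.length : Int)) :
    ovest m righe colonne = ovest_alt m righe colonne := by
  have hRe : righe = ((righe.toNat : Nat) : Int) := by omega
  have hCe : colonne = ((colonne.toNat : Nat) : Int) := by omega
  set R' := righe.toNat with hR'
  set C' := colonne.toNat with hC'
  have hR1 : 1 ≤ R' := by omega
  have hC2 : 2 ≤ C' := by omega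
  have hlen : R' ≤ m.length := by omega
  have hrow : ∀ r : Nat, r < R' → C' ≤ (m[r]?.getD []).length := by
    intro r hr
    have hrl : r < m.length := by omega
    have hmem : m[r] ∈ m.take righe.toNat := by
      refine List.mem_take_iff_getElem.mpr ⟨r, ?_, ?_⟩
      · simp; omega
      · simp
    have h2 := hrowI _ hmem
    rw [List.getElem?_eq_getElem hrl]
    simp only [Option.getD_some]
    omega
  rw [hRe, hCe, ovest_eq_pvAfold]
  have ekA : (((C' : Nat) : Int) - 1).toNat = C' - 1 := by omega
  rw [ekA]
  unfold ovest_alt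
  rw [if_pos ⟨by omega, by omega⟩]
  set L := pvFinals (pvCols m (R' : Int) (C' : Int)) with hL
  have hB : ∀ r c : Nat,
      pvCell ((PySem.List.enumerate L 0).foldl
        (fun m p => pvWriteCol (R' : Int) p.1 m p.2) m) r c
      = if r < R' ∧ 0 ≤ c ∧ c < 0 + L.length ∧ (pvCell m r c).isSome
        then some ((L.getD (c-0) []).getD r 7) else pvCell m r c := by
    intro r c
    have h := pvWriteFold R' L 0 m r c
    simpa using h
  have hLlen : L.length = C' := by rw [hL, length_pvFinals, pvCols_length]
  have hAcell := pvAinv m R' C' hC2 hlen hrow (C'-1) (le_refl _)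
  have hAlen : (pvAfold m (R' : Int) (C' : Int) (C'-1)).length = m.length :=
    length_pvAfold m R' C' (C'-1) (le_refl _)
  have hBlen : ((PySem.List.enumerate L 0).foldl
      (fun m p => pvWriteCol (R' : Int) p.1 m p.2) m).length = m.length :=
    length_pvWriteAll R' L 0 m
  have hcell : ∀ r c : Nat,
      pvCell (pvAfold m (R' : Int) (C' : Int) (C'-1)) r c
        = pvCell ((PySem.List.enumerate L 0).foldl
            (fun m p => pvWriteCol (R' : Int) p.1 m p.2) m) r c := by
    intro r c
    rw [hAcell r c, hB r c]
    by_cases hrR : r < R'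
    · by_cases hcC : c < C'
      · have hsome : (pvCell m r c).isSome := by
          rw [pvCell_orig m R' C' hlen hrow r c hrR hcC]
          rfl
        have hval : (L.getD (c-0) []).getD r 7 = pvFinV (pvCols m (R' : Int) (C' : Int)) c r := by
          rw [Nat.sub_zero, hL]
          exact pvFinV_getD _ c r
        by_cases hlast : c < C' - 1
        · rw [if_pos ⟨hrR, by omega, by omega⟩,
            if_pos ⟨hrR, by omega, by rw [hLlen]; omega, hsome⟩, hval]
        · have hceq : c = C' - 1 := by omega
          rw [if_neg (by omega),
            if_pos ⟨hrR, by omega, by rw [hLlen]; omega, hsome⟩, hval]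
          subst hceq
          rw [pvFinV_last m R' C' hC2 r hrR]
          exact pvCell_orig m R' C' hlen hrow r (C'-1) hrR (by omega)
      · rw [if_neg (by omega),
          if_neg (by rintro ⟨_, _, hx, _⟩; rw [hLlen] at hx; omega)]
    · rw [if_neg (by omega), if_neg (by tauto)]
  apply List.ext_getElem?
  intro r
  by_cases hrl : r < m.length
  · have hAr := List.getElem?_eq_getElem (hAlen ▸ hrl :
      r < (pvAfold m (R' : Int) (C' : Int) (C'-1)).length)
    have hBr := List.getElem?_eq_getElem (hBlen ▸ hrl :
      r < ((PySem.List.enumerate L 0).foldl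
        (fun m p => pvWriteCol (R' : Int) p.1 m p.2) m).length)
    rw [hAr, hBr]
    congr 1
    apply List.ext_getElem?
    intro c
    have h := hcell r c
    unfold pvCell at h
    rw [hAr, hBr] at h
    simpa using h
  · rw [List.getElem?_eq_none (by omega), List.getElem?_eq_none (by omega)]

-- ===== VERDICT (by name: the statement is the Claim_ definition above) =====
theorem ovest_spec : Claim_equal_ovest := by
  intro m righe colonne _ hPre
  unfold Spec_ovest
  by_cases hmain : 2 ≤ colonne ∧ 1 ≤ righe
  · obtain ⟨hC, hR⟩ := hmain
    obtain ⟨hlenI, hrowI⟩ := hPre hC hR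
    exact pvFinal_eq m righe colonne hC hR hlenI hrowI
  · unfold ovest_alt
    rw [if_neg hmain]
    unfold ovest
    rcases not_and_or.mp hmain with hc | hr
    · rw [PySem.List.pyRange_neg_one_eq_nil (by omega)]
      rfl
    · have hid : ∀ (mm : List (List Int)) (jj : Int),
          (PySem.List.pyRange 0 righe 1).foldl (pvBodyA righe jj) mm = mm := by
        intro mm jj
        rw [PySem.List.pyRange_one_eq_nil (by omega)]
        rfl
      calc (PySem.List.pyRange (colonne-1) 0 (-1)).foldl
            (fun mm jj => (PySem.List.pyRange 0 righe 1).foldl (pvBodyA righe jj) mm) m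
          = (PySem.List.pyRange (colonne-1) 0 (-1)).foldl (fun mm (_ : Int) => mm) m :=
            PySem.List.foldl_congr_mem _ _ _ _ (fun acc x _ => hid acc x)
        _ = m := pvFoldl_id _ m
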